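-- pv_equiv track=rewrite | github.com/YagmurTaze/CodeStepByStep-Python | strings/same_dashes.py | same_dashes
-- ===== SOURCE A (Python) =====
-- def same_dashes(st1, st2):
--     d_num1 = st1.count("-")
--     d_num2 = st2.count("-")
--
--     if not d_num1 == d_num2:
--         return False
--
--     flag = 0
--     for i in range (len(st1)):
--
--         id1 = st1.find("-",flag,len(st1))
--         id2 = st2.find("-",flag,len(st2))
--
--         if not id1 == id2:
--             return False
--         flag = id1 + 1
--
--     return True
-- ===== SOURCE B (Python) =====
-- def same_dashes(st1, st2):
--     n1, n2 = len(st1), len(st2)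
--     for i in range(max(n1, n2)):
--         c1 = st1[i] if i < n1 else 'x'
--         c2 = st2[i] if i < n2 else 'x'
--         if (c1 == '-') != (c2 == '-'):
--             return False
--     return True
-- ===== Notes on version B (the rewrite author's own statement) =====
-- stated objective: faster
-- what changed: Replaces the dash-count check plus a len(st1)-iteration loop of repeated str.find index-matching with a single synchronized per-position scan over the padded length comparing dash-ness of aligned characters.
import Mathlib
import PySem

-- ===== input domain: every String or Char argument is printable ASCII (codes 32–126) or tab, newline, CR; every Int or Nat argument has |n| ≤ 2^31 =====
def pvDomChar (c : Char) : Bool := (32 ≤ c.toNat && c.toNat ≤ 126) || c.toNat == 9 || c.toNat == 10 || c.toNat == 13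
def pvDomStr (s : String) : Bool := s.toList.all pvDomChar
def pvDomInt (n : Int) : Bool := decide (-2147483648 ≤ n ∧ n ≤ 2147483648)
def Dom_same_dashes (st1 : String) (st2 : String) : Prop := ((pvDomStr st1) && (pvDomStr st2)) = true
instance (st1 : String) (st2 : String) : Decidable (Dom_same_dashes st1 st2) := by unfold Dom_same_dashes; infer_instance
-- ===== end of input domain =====

-- B replaces A's dash-count check plus O(n^2) repeated str.find index matching with one
-- synchronized O(n) per-position scan comparing dash-ness of aligned characters (faster).

-- ===== PORT A =====
-- the 'for i in range(len(st1))' loop: fuel = remaining iterations, flag as in A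
def sdLoopA (l1 l2 : List Char) : Nat → Int → Bool
  | 0, _ => true
  | fuel + 1, flag =>
    let id1 := PySem.Chars.findFrom l1 ['-'] flag (some (l1.length : Int))
    let id2 := PySem.Chars.findFrom l2 ['-'] flag (some (l2.length : Int))
    if ¬ (id1 = id2) then false
    else sdLoopA l1 l2 fuel (id1 + 1)

def same_dashes (st1 : String) (st2 : String) : Bool :=
  let d_num1 := PySem.Chars.count st1.toList ['-']
  let d_num2 := PySem.Chars.count st2.toList ['-']
  if ¬ (d_num1 = d_num2) then false
  else sdLoopA st1.toList st2.toList st1.toList.length 0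

-- ===== PORT B =====
-- B's 'for i in range(max(n1, n2))' loop over the index list
def sdLoopB (l1 l2 : List Char) : List Nat → Bool
  | [] => true
  | i :: rest =>
    let c1 := if i < l1.length then l1.getD i 'x' else 'x'
    let c2 := if i < l2.length then l2.getD i 'x' else 'x'
    if ((c1 == '-') != (c2 == '-')) then false
    else sdLoopB l1 l2 rest

def same_dashes_alt (st1 : String) (st2 : String) : Bool :=
  sdLoopB st1.toList st2.toList (List.range (max st1.toList.length st2.toList.length))

-- ===== PRECONDITION & SPEC =====
def Spec_same_dashes (st1 : String) (st2 : String) (out : Bool) : Prop := out = same_dashes_alt st1 st2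
instance (st1 : String) (st2 : String) (out : Bool) : Decidable (Spec_same_dashes st1 st2 out) := by unfold Spec_same_dashes; infer_instance

-- ===== CLAIM (what is proved, stated in full; the proofs are below) =====
def Claim_equal_same_dashes : Prop := ∀ (st1 : String) (st2 : String), Dom_same_dashes st1 st2 → Spec_same_dashes st1 st2 (same_dashes st1 st2)

-- ===== LEMMAS AND PROOFS =====

-- indices of the dashes, in increasing order
def dIdx (l : List Char) : List Nat := (List.range l.length).filter (fun i => l.getD i 'x' == '-')

theorem dIdx_cons (c : Char) (t : List Char) :
    dIdx (c :: t) = (if c = '-' then [0] else []) ++ (dIdx t).map (· + 1) := by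
  simp only [dIdx, List.length_cons, List.range_succ_eq_map, List.filter_cons,
    List.filter_map, Function.comp_def, Nat.succ_eq_add_one, List.getD_cons_succ,
    List.getD_cons_zero]
  by_cases hc : c = '-' <;> simp [hc]

theorem dIdx_sorted (l : List Char) : (dIdx l).Pairwise (· < ·) :=
  List.Pairwise.filter _ List.pairwise_lt_range

theorem mem_dIdx {l : List Char} {i : Nat} :
    i ∈ dIdx l ↔ i < l.length ∧ l.getD i 'x' = '-' := by
  simp [dIdx, List.mem_filter, List.mem_range]

theorem length_dIdx (l : List Char) : (dIdx l).length = l.countP (· == '-') := by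
  induction l with
  | nil => rfl
  | cons c t ih =>
    rw [dIdx_cons]
    by_cases hc : c = '-' <;> simp [hc, ih]

-- A's str.count counts the dashes
theorem count_go_single (c : Char) (l : List Char) (fuel acc : Nat) (h : l.length ≤ fuel) :
    PySem.Chars.count.go [c] fuel l acc = acc + l.countP (· == c) := by
  induction l generalizing fuel acc with
  | nil => cases fuel <;> simp [PySem.Chars.count.go]
  | cons x t ih =>
    cases fuel with
    | zero => simp at h
    | succ f =>
      have ht : t.length ≤ f := by simpa using h
      have step : PySem.Chars.count.go [c] (f + 1) (x :: t) acc =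
          if c = x then PySem.Chars.count.go [c] f t (acc + 1)
          else PySem.Chars.count.go [c] f t acc := by
        simp [PySem.Chars.count.go, List.isPrefixOf]
      rw [step, List.countP_cons]
      by_cases hx : c = x
      · rw [if_pos hx, ih f (acc + 1) ht, if_pos (by simp [hx.symm])]
        omega
      · rw [if_neg hx, ih f acc ht,
          if_neg (by simp only [beq_iff_eq]; exact fun h => hx h.symm)]
        omega

theorem count_dash (l : List Char) : PySem.Chars.count l ['-'] = (dIdx l).length := by
  rw [length_dIdx]
  simp [PySem.Chars.count, count_go_single '-' l l.length 0 le_rfl]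

-- A's find with end = len(s) is find with no end bound
theorem findFrom_some_len (l sub : List Char) (st : Int) :
    PySem.Chars.findFrom l sub st (some (l.length : Int)) = PySem.Chars.findFrom l sub st none := by
  have h1 : ¬ ((l.length : Int) < (l.length : Int)) := lt_irrefl _
  have h2 : ¬ ((l.length : Int) < 0) := by omega
  simp [PySem.Chars.findFrom, h2, List.take_length]

-- singleton-prefix characterisation
theorem dash_prefix_drop {l : List Char} {i : Nat} :
    ['-'] <+: l.drop i ↔ i < l.length ∧ l.getD i 'x' = '-' := by
  by_cases hi : i < l.length
  · rw [List.drop_eq_getElem_cons hi, List.cons_prefix_cons, List.getD_eq_getElem l 'x' hi]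
    simp only [List.nil_prefix, and_true]
    exact ⟨fun h => ⟨hi, h.symm⟩, fun h => h.2.symm⟩
  · rw [List.drop_eq_nil_of_le (Nat.le_of_not_lt hi)]
    simp [List.prefix_nil, hi]

-- s.find('-') is the first dash index
theorem find_dash (l : List Char) :
    PySem.Chars.find l ['-'] = match dIdx l with | [] => -1 | j :: _ => (j : Int) := by
  cases h : dIdx l with
  | nil =>
    rw [PySem.Chars.find_eq_neg_one_iff]
    intro hinf
    obtain ⟨j, hj⟩ := (PySem.Chars.exists_prefix_drop_iff_isIn ['-'] l).mpr
      ((PySem.Chars.isIn_iff_infix ['-'] l).mpr hinf)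
    have : j ∈ dIdx l := mem_dIdx.mpr (dash_prefix_drop.mp hj)
    rw [h] at this
    exact absurd this (List.not_mem_nil)
  | cons j r =>
    have hj : j ∈ dIdx l := by rw [h]; exact List.mem_cons_self ..
    have hjd := mem_dIdx.mp hj
    have hinf : ['-'] <:+: l := by
      rw [← PySem.Chars.isIn_iff_infix, ← PySem.Chars.exists_prefix_drop_iff_isIn]
      exact ⟨j, dash_prefix_drop.mpr hjd⟩
    have hnn : 0 ≤ PySem.Chars.find l ['-'] := (PySem.Chars.find_nonneg_iff _ _).mpr hinf
    obtain ⟨hpre, hmin⟩ := PySem.Chars.find_spec hnn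
    have hmem : (PySem.Chars.find l ['-']).toNat ∈ dIdx l :=
      mem_dIdx.mpr (dash_prefix_drop.mp hpre)
    have hjn : (PySem.Chars.find l ['-']).toNat = j := by
      rw [h] at hmem
      rcases List.mem_cons.mp hmem with he | hr
      · exact he
      · have hlt : j < (PySem.Chars.find l ['-']).toNat :=
          (List.pairwise_cons.mp (h ▸ dIdx_sorted l)).1 _ hr
        exact absurd (dash_prefix_drop.mpr hjd) (hmin j hlt)
    simp only []
    omega

-- dashes at index ≥ k are the dashes of the dropped suffix, shifted
theorem dIdx_drop (l : List Char) (k : Nat) (hk : k ≤ l.length) :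
    (dIdx l).dropWhile (fun j => decide (j < k)) = (dIdx (l.drop k)).map (· + k) := by
  induction k generalizing l with
  | zero => simp
  | succ k ih =>
    cases l with
    | nil => simp at hk
    | cons c t =>
      have hk' : k ≤ t.length := by simpa using hk
      rw [dIdx_cons, List.drop_succ_cons]
      have hpred : ((fun j => decide (j < k + 1)) ∘ fun x => x + 1)
          = (fun j => decide (j < k)) := by
        funext j
        simp [Function.comp]
      have hmap : List.dropWhile (fun j => decide (j < k + 1)) ((dIdx t).map (· + 1))
          = ((dIdx t).dropWhile (fun j => decide (j < k))).map (· + 1) := by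
        rw [List.dropWhile_map, hpred]
      have hcomp : ((dIdx t).dropWhile (fun j => decide (j < k))).map (· + 1)
          = (dIdx (t.drop k)).map (· + (k + 1)) := by
        rw [ih t hk', List.map_map]
        apply List.map_congr_left
        intro x _
        simp only [Function.comp_apply]
        omega
      by_cases hc : c = '-'
      · subst hc
        rw [if_pos rfl, List.singleton_append, List.dropWhile_cons,
          if_pos (by simp), hmap, hcomp]
      · rw [if_neg hc, List.nil_append, hmap, hcomp]

-- A's find('-', flag, len) is the first dash index ≥ flag
theorem findFrom_dash (l : List Char) (k : Nat) (hk : k ≤ l.length) :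
    PySem.Chars.findFrom l ['-'] (k : Int) (some (l.length : Int)) =
      match (dIdx l).dropWhile (fun j => decide (j < k)) with
      | [] => -1
      | j :: _ => (j : Int) := by
  rw [findFrom_some_len, PySem.Chars.findFrom_natCast l ['-'] k hk, find_dash,
    dIdx_drop l k hk]
  cases h : dIdx (l.drop k) with
  | nil => simp
  | cons j r =>
    simp only [List.map_cons]
    have hne : ¬ ((j : Int) = -1) := by omega
    simp only [hne, if_false]
    push_cast
    ring

-- if the dash indices agree, A's loop never fails
theorem sdLoopA_of_eq (l1 l2 : List Char) (h : dIdx l1 = dIdx l2) :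
    ∀ (fuel k : Nat), k ≤ l1.length → k ≤ l2.length → sdLoopA l1 l2 fuel (k : Int) = true := by
  intro fuel
  induction fuel with
  | zero => intro k _ _; rfl
  | succ f ih =>
    intro k hk1 hk2
    simp only [sdLoopA]
    rw [findFrom_dash l1 k hk1, findFrom_dash l2 k hk2, ← h]
    cases hd : (dIdx l1).dropWhile (fun j => decide (j < k)) with
    | nil =>
      show (if ¬ ((-1 : Int) = -1) then false else sdLoopA l1 l2 f (-1 + 1)) = true
      rw [if_neg (by simp)]
      have hc : (-1 : Int) + 1 = ((0 : Nat) : Int) := by norm_num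
      rw [hc]
      exact ih 0 (Nat.zero_le _) (Nat.zero_le _)
    | cons j r =>
      have hj1 : j ∈ dIdx l1 := (List.dropWhile_sublist _).subset (hd ▸ List.mem_cons_self ..)
      have hj2 : j ∈ dIdx l2 := h ▸ hj1
      have hb1 : j < l1.length := (mem_dIdx.mp hj1).1
      have hb2 : j < l2.length := (mem_dIdx.mp hj2).1
      show (if ¬ ((j : Int) = (j : Int)) then false else sdLoopA l1 l2 f ((j : Int) + 1)) = true
      rw [if_neg (by simp)]
      have hc : ((j : Int)) + 1 = ((j + 1 : Nat) : Int) := by push_cast; ring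
      rw [hc]
      exact ih (j + 1) (by omega) (by omega)

-- splitting the sorted dash list one dash further
theorem split_takeWhile_succ {d : List Nat} {k j : Nat} {r : List Nat}
    (hs : d.Pairwise (· < ·))
    (hd : d.dropWhile (fun x => decide (x < k)) = j :: r) :
    d.takeWhile (fun x => decide (x < j + 1)) = d.takeWhile (fun x => decide (x < k)) ++ [j] ∧
    d.dropWhile (fun x => decide (x < j + 1)) = r := by
  set tw := d.takeWhile (fun x => decide (x < k)) with htw
  have hsplit : d = tw ++ j :: r := by rw [htw, ← hd, List.takeWhile_append_dropWhile]
  have hpw := hsplit ▸ hs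
  rw [List.pairwise_append] at hpw
  have htwlt : ∀ x ∈ tw, x < j + 1 := fun x hx =>
    Nat.lt_succ_of_lt (hpw.2.2 x hx j (List.mem_cons_self ..))
  have hrgt : ∀ y ∈ r, ¬ (y < j + 1) := fun y hy => by
    have := (List.pairwise_cons.mp hpw.2.1).1 y hy
    omega
  have htwfull : tw.takeWhile (fun x => decide (x < j + 1)) = tw :=
    List.takeWhile_eq_self_iff.mpr (fun x hx => by simpa using htwlt x hx)
  have htwdrop : tw.dropWhile (fun x => decide (x < j + 1)) = [] :=
    List.dropWhile_eq_nil_iff.mpr (fun x hx => by simpa using htwlt x hx)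
  constructor
  · conv_lhs => rw [hsplit]
    rw [List.takeWhile_append, htwfull]
    rw [if_pos rfl, List.takeWhile_cons]
    simp only [show decide (j < j + 1) = true by simp]
    cases hr : r with
    | nil => simp
    | cons y r' =>
      rw [List.takeWhile_cons]
      simp [hrgt y (hr ▸ List.mem_cons_self ..)]
  · conv_lhs => rw [hsplit]
    rw [List.dropWhile_append]
    rw [htwdrop]
    simp only [List.isEmpty_nil]
    rw [if_pos trivial, List.dropWhile_cons]
    simp only [show decide (j < j + 1) = true by simp]
    cases hr : r with
    | nil => simp
    | cons y r' =>
      rw [List.dropWhile_cons]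
      simp [hrgt y (hr ▸ List.mem_cons_self ..)]

-- when no dash at index ≥ k remains in l1, equal prefixes and counts force equality
theorem eq_of_drop_nil {l1 l2 : List Char} {k : Nat}
    (hlen : (dIdx l1).length = (dIdx l2).length)
    (htw : (dIdx l1).takeWhile (fun j => decide (j < k)) = (dIdx l2).takeWhile (fun j => decide (j < k)))
    (hd : (dIdx l1).dropWhile (fun j => decide (j < k)) = []) :
    dIdx l1 = dIdx l2 := by
  have h1 : dIdx l1 = (dIdx l1).takeWhile (fun j => decide (j < k)) := by
    conv_lhs => rw [← List.takeWhile_append_dropWhile (p := fun j => decide (j < k)) (l := dIdx l1)]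
    rw [hd, List.append_nil]
  have h2 : dIdx l2 = (dIdx l2).takeWhile (fun j => decide (j < k)) ++
      (dIdx l2).dropWhile (fun j => decide (j < k)) :=
    (List.takeWhile_append_dropWhile ..).symm
  have hlen2 : ((dIdx l2).dropWhile (fun j => decide (j < k))).length = 0 := by
    have e1 := congrArg List.length h1
    have e2 := congrArg List.length h2
    have e3 := congrArg List.length htw
    rw [List.length_append] at e2
    omega
  calc dIdx l1 = (dIdx l1).takeWhile (fun j => decide (j < k)) := h1
    _ = (dIdx l2).takeWhile (fun j => decide (j < k)) := htw
    _ = (dIdx l2).takeWhile (fun j => decide (j < k)) ++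
        (dIdx l2).dropWhile (fun j => decide (j < k)) := by
          rw [List.length_eq_zero_iff.mp hlen2, List.append_nil]
    _ = dIdx l2 := List.takeWhile_append_dropWhile ..

-- main loop invariant for A
theorem sdLoopA_spec (l1 l2 : List Char) (hlen : (dIdx l1).length = (dIdx l2).length) :
    ∀ (fuel k : Nat), k ≤ l1.length → k ≤ l2.length →
      (dIdx l1).takeWhile (fun j => decide (j < k)) = (dIdx l2).takeWhile (fun j => decide (j < k)) →
      ((dIdx l1).dropWhile (fun j => decide (j < k))).length ≤ fuel →
      (sdLoopA l1 l2 fuel (k : Int) = true ↔ dIdx l1 = dIdx l2) := by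
  intro fuel
  induction fuel with
  | zero =>
    intro k _ _ htw hfl
    have hd : (dIdx l1).dropWhile (fun j => decide (j < k)) = [] :=
      List.length_eq_zero_iff.mp (Nat.le_zero.mp hfl)
    simpa [sdLoopA] using eq_of_drop_nil hlen htw hd
  | succ f ih =>
    intro k hk1 hk2 htw hfl
    simp only [sdLoopA]
    rw [findFrom_dash l1 k hk1, findFrom_dash l2 k hk2]
    cases hd1 : (dIdx l1).dropWhile (fun j => decide (j < k)) with
    | nil =>
      have heq : dIdx l1 = dIdx l2 := eq_of_drop_nil hlen htw hd1
      have hd2 : (dIdx l2).dropWhile (fun j => decide (j < k)) = [] := by rw [← heq, hd1]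
      rw [hd2]
      show (if ¬ ((-1 : Int) = -1) then false else sdLoopA l1 l2 f (-1 + 1)) = true ↔ dIdx l1 = dIdx l2
      rw [if_neg (by simp)]
      have hc : (-1 : Int) + 1 = ((0 : Nat) : Int) := by norm_num
      rw [hc, sdLoopA_of_eq l1 l2 heq f 0 (Nat.zero_le _) (Nat.zero_le _)]
      simp [heq]
    | cons j1 r1 =>
      cases hd2 : (dIdx l2).dropWhile (fun j => decide (j < k)) with
      | nil =>
        have hne : dIdx l1 ≠ dIdx l2 := by
          intro he
          rw [he, hd2] at hd1
          exact absurd hd1 (by simp)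
        show (if ¬ ((j1 : Int) = -1) then false else sdLoopA l1 l2 f ((j1 : Int) + 1)) = true ↔
          dIdx l1 = dIdx l2
        rw [if_pos (by omega)]
        simp [hne]
      | cons j2 r2 =>
        show (if ¬ ((j1 : Int) = (j2 : Int)) then false else sdLoopA l1 l2 f ((j1 : Int) + 1)) = true ↔
          dIdx l1 = dIdx l2
        by_cases hj : j1 = j2
        · subst hj
          have hj1 : j1 ∈ dIdx l1 := (List.dropWhile_sublist _).subset (hd1 ▸ List.mem_cons_self ..)
          have hj2 : j1 ∈ dIdx l2 := (List.dropWhile_sublist _).subset (hd2 ▸ List.mem_cons_self ..)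
          have hb1 : j1 < l1.length := (mem_dIdx.mp hj1).1
          have hb2 : j1 < l2.length := (mem_dIdx.mp hj2).1
          obtain ⟨ht1, hdr1⟩ := split_takeWhile_succ (dIdx_sorted l1) hd1
          obtain ⟨ht2, hdr2⟩ := split_takeWhile_succ (dIdx_sorted l2) hd2
          rw [if_neg (by simp)]
          have hc : ((j1 : Int)) + 1 = ((j1 + 1 : Nat) : Int) := by push_cast; ring
          rw [hc]
          apply ih (j1 + 1) (by omega) (by omega)
          · rw [ht1, ht2, htw]
          · rw [hdr1]
            rw [hd1] at hfl
            simpa using Nat.le_of_succ_le_succ (by simpa using hfl)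
        · have hne : dIdx l1 ≠ dIdx l2 := by
            intro he
            rw [he, hd2] at hd1
            exact hj (by injection hd1 with hji _; exact hji.symm)
          rw [if_pos (by simpa using hj)]
          simp [hne]

-- B's loop checks every listed index
theorem sdLoopB_spec (l1 l2 : List Char) (is : List Nat) :
    sdLoopB l1 l2 is = true ↔
      ∀ i ∈ is, ((if i < l1.length then l1.getD i 'x' else 'x') == '-')
              = ((if i < l2.length then l2.getD i 'x' else 'x') == '-') := by
  induction is with
  | nil => simp [sdLoopB]
  | cons i rest ih =>
    simp only [sdLoopB]
    rw [List.forall_mem_cons]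
    by_cases hcond : ((if i < l1.length then l1.getD i 'x' else 'x') == '-')
        = ((if i < l2.length then l2.getD i 'x' else 'x') == '-')
    · rw [if_neg (by rw [hcond]; simp)]
      exact ⟨fun h => ⟨hcond, ih.mp h⟩, fun h => ih.mpr h.2⟩
    · rw [if_pos (by simp only [bne_iff_ne, ne_eq]; exact hcond)]
      exact iff_of_false (by simp) (fun h => hcond h.1)

-- the per-position dash test is the dash-index membership test
theorem memBool (l : List Char) (i : Nat) :
    ((if i < l.length then l.getD i 'x' else 'x') == '-') = decide (i ∈ dIdx l) := by
  by_cases hi : i < l.length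
  · rw [if_pos hi]
    have hg : l.getD i 'x' = l[i] := List.getD_eq_getElem l 'x' hi
    by_cases h : l[i] = '-'
    · rw [hg, h]
      simp [mem_dIdx, hi, h]
    · rw [show (l.getD i 'x' == '-') = false by rw [hg]; simp [h]]
      simp [mem_dIdx, hi, h]
  · rw [if_neg hi]
    simp [mem_dIdx, hi]

theorem sorted_eq_of_mem_iff {a b : List Nat} (ha : a.Pairwise (· < ·)) (hb : b.Pairwise (· < ·))
    (h : ∀ i, i ∈ a ↔ i ∈ b) : a = b := by
  have hperm : a.Perm b :=
    (List.perm_ext_iff_of_nodup (ha.imp ne_of_lt) (hb.imp ne_of_lt)).mpr h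
  exact List.Perm.eq_of_pairwise (fun x y _ _ h1 h2 => by omega) ha hb hperm

theorem alt_eq_decide (l1 l2 : List Char) :
    sdLoopB l1 l2 (List.range (max l1.length l2.length)) = decide (dIdx l1 = dIdx l2) := by
  by_cases hd : dIdx l1 = dIdx l2
  · simp only [hd, decide_true]
    rw [sdLoopB_spec]
    intro i _
    rw [memBool, memBool, hd]
  · simp only [hd, decide_false]
    rw [Bool.eq_false_iff, Ne, sdLoopB_spec]
    intro hall
    apply hd
    apply sorted_eq_of_mem_iff (dIdx_sorted l1) (dIdx_sorted l2)
    intro i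
    by_cases hi : i < max l1.length l2.length
    · have := hall i (List.mem_range.mpr hi)
      rw [memBool, memBool] at this
      exact decide_eq_decide.mp this
    · constructor <;> intro hm <;>
        [exact absurd (mem_dIdx.mp hm).1 (by omega);
         exact absurd (mem_dIdx.mp hm).1 (by omega)]

theorem same_eq (st1 st2 : String) : same_dashes st1 st2 = same_dashes_alt st1 st2 := by
  unfold same_dashes same_dashes_alt
  rw [alt_eq_decide, count_dash, count_dash]
  by_cases hlen : (dIdx st1.toList).length = (dIdx st2.toList).length
  · rw [if_neg (by simpa using hlen)]
    have htw0 : ∀ d : List Nat, d.takeWhile (fun j => decide (j < 0)) = [] := by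
      intro d; cases d <;> simp
    have hdw0 : ∀ d : List Nat, d.dropWhile (fun j => decide (j < 0)) = d := by
      intro d; cases d <;> simp [List.dropWhile]
    have hfu : ((dIdx st1.toList).dropWhile (fun j => decide (j < 0))).length ≤ st1.toList.length := by
      rw [hdw0]
      calc (dIdx st1.toList).length ≤ (List.range st1.toList.length).length :=
            List.length_filter_le _ _
        _ = st1.toList.length := List.length_range
    have hmain := sdLoopA_spec st1.toList st2.toList hlen st1.toList.length 0
      (Nat.zero_le _) (Nat.zero_le _) (by rw [htw0, htw0]) hfu
    rw [show ((0 : Nat) : Int) = 0 from rfl] at hmain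
    by_cases hq : dIdx st1.toList = dIdx st2.toList
    · simp only [hq, decide_true]
      exact hmain.mpr hq
    · simp only [hq, decide_false]
      exact Bool.eq_false_iff.mpr (fun ht => hq (hmain.mp ht))
  · rw [if_pos (by simpa using hlen)]
    have hne : dIdx st1.toList ≠ dIdx st2.toList := fun he => hlen (by rw [he])
    simp [hne]

-- ===== VERDICT (by name: the statement is the Claim_ definition above) =====
theorem same_dashes_spec : Claim_equal_same_dashes := by
  intro st1 st2 _
  unfold Spec_same_dashes
  exact same_eq st1 st2
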